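-- pv_equiv track=rewrite | github.com/Cristian0624/Mobile_App | home_fixed.py | _check_for_navigation_command
-- ===== SOURCE A (Python) =====
-- def _check_for_navigation_command(text):
--     """Check if the user is requesting to navigate to a specific screen"""
--     text = text.lower()
--
--     # Check for navigation to reminders screen
--     if any(phrase in text for phrase in [
--         'go to reminder', 'go to reminders', 'show reminder', 'show reminders',
--         'open reminder', 'open reminders', 'view reminder', 'view reminders',
--         'take me to reminder', 'take me to reminders', 'navigate to reminder', 'navigate to reminders'
--     ]):
--         return 'reminder'
--
--     # Check for navigation to home screen
--     if any(phrase in text for phrase in [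
--         'go to home', 'go home', 'show home', 'open home', 'view home',
--         'take me to home', 'navigate to home', 'return to home', 'back to home'
--     ]):
--         return 'home'
--
--     return None
-- ===== SOURCE B (Python) =====
-- # Keyword-anchored search: locate each occurrence of the target word,
-- # then check whether a command verb immediately precedes it.
-- _REMINDER_VERBS = ('go to ', 'show ', 'open ', 'view ', 'take me to ', 'navigate to ')
-- _HOME_VERBS = ('go to ', 'go ', 'show ', 'open ', 'view ', 'take me to ',
--                'navigate to ', 'return to ', 'back to ')
--
--
-- def _check_for_navigation_command(text):
--     """Check if the user is requesting to navigate to a specific screen.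
--
--     Instead of testing whole phrases, find every occurrence of the target
--     keyword and accept it when one of the command verbs immediately
--     precedes it.  The plural keyword form needs no extra handling: it
--     contains the singular one.
--     """
--     t = text.lower()
--     i = t.find('reminder')
--     while i != -1:
--         if t[:i].endswith(_REMINDER_VERBS):
--             return 'reminder'
--         i = t.find('reminder', i + 1)
--     i = t.find('home')
--     while i != -1:
--         if t[:i].endswith(_HOME_VERBS):
--             return 'home'
--         i = t.find('home', i + 1)
--     return None
-- ===== Notes on version B (the rewrite author's own statement) =====
-- stated objective: alternative
-- what changed: Instead of testing 21 whole phrases for substring membership, B searches for the two target keywords ('reminder', 'home') and, at each occurrence, checks whether the prefix before it ends with one of the command verbs; the plural phrase variants disappear since each contains its singular form.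
import Mathlib
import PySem

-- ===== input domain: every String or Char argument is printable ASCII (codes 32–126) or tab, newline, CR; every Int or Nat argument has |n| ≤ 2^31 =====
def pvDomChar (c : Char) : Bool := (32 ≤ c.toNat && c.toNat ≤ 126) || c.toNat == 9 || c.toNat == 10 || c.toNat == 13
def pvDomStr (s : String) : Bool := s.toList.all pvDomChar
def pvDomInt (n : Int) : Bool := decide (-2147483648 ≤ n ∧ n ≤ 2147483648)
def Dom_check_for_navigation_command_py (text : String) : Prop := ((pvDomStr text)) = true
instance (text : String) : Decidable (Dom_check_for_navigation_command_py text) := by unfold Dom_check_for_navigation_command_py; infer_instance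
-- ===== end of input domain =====

-- ===== PORT A =====
-- B replaces per-phrase substring tests by a keyword-occurrence search with a verb-prefix check (objective: alternative).
def remPhrasesA : List String :=
  ["go to reminder", "go to reminders", "show reminder", "show reminders",
   "open reminder", "open reminders", "view reminder", "view reminders",
   "take me to reminder", "take me to reminders", "navigate to reminder", "navigate to reminders"]

def homePhrasesA : List String :=
  ["go to home", "go home", "show home", "open home", "view home",
   "take me to home", "navigate to home", "return to home", "back to home"]

def check_for_navigation_command_py (text : String) : Option String :=
  let t := PySem.Str.lower text
  if remPhrasesA.any (fun p => PySem.Str.isIn p t) then some "reminder"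
  else if homePhrasesA.any (fun p => PySem.Str.isIn p t) then some "home"
  else none

-- ===== PORT B =====
def remVerbs : List (List Char) :=
  ["go to ".toList, "show ".toList, "open ".toList, "view ".toList,
   "take me to ".toList, "navigate to ".toList]

def homeVerbs : List (List Char) :=
  ["go to ".toList, "go ".toList, "show ".toList, "open ".toList, "view ".toList,
   "take me to ".toList, "navigate to ".toList, "return to ".toList, "back to ".toList]

-- Source B's 'i = t.find(kw); while i != -1: if t[:i].endswith(verbs): return; i = t.find(kw, i+1)'
-- loop: 'find' scans the positions, so the loop visits every split point pre/rest of t in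
-- order, tests at occurrence positions (kw starts rest) whether some verb ends pre.
def kwScan (kw : List Char) (verbs : List (List Char)) : List Char → List Char → Bool
  | _, [] => false
  | pre, c :: rest =>
    (PySem.Chars.startswith (c :: rest) kw
       && verbs.any (fun v => PySem.Chars.endswith pre v))
    || kwScan kw verbs (pre ++ [c]) rest

def check_for_navigation_command_py_alt (text : String) : Option String :=
  let t := (PySem.Str.lower text).toList
  if kwScan "reminder".toList remVerbs [] t then some "reminder"
  else if kwScan "home".toList homeVerbs [] t then some "home"
  else none

-- ===== PRECONDITION & SPEC =====
def Spec_check_for_navigation_command_py (text : String) (out : Option String) : Prop := out = check_for_navigation_command_py_alt text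
instance (text : String) (out : Option String) : Decidable (Spec_check_for_navigation_command_py text out) := by unfold Spec_check_for_navigation_command_py; infer_instance

-- ===== CLAIM (what is proved, stated in full; the proofs are below) =====
def Claim_equal_check_for_navigation_command_py : Prop := ∀ (text : String), Dom_check_for_navigation_command_py text → Spec_check_for_navigation_command_py text (check_for_navigation_command_py text)

-- ===== LEMMAS AND PROOFS =====

-- invariant of B's scan: some split point of rest starts with kw and the accumulated
-- prefix up to it ends with a verb
lemma kwScan_iff (kw : List Char) (verbs : List (List Char)) (hkw : kw ≠ []) :
    ∀ (rest pre : List Char),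
      kwScan kw verbs pre rest = true ↔
        ∃ u s, rest = u ++ s ∧ kw <+: s ∧ ∃ v ∈ verbs, v <:+ (pre ++ u) := by
  intro rest
  induction rest with
  | nil =>
    intro pre
    simp only [kwScan]
    constructor
    · intro h; cases h
    · rintro ⟨u, s, hus, hkws, -⟩
      rcases List.append_eq_nil_iff.mp hus.symm with ⟨rfl, rfl⟩
      exact absurd (List.prefix_nil.mp hkws) hkw
  | cons c rest ih =>
    intro pre
    simp only [kwScan, Bool.or_eq_true, Bool.and_eq_true, List.any_eq_true,
      PySem.Chars.startswith_iff, PySem.Chars.endswith_iff, ih (pre ++ [c])]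
    constructor
    · rintro (⟨h1, v, hv, h2⟩ | ⟨u, s, hus, hkws, v, hv, hsuf⟩)
      · exact ⟨[], c :: rest, rfl, h1, v, hv, by simpa using h2⟩
      · exact ⟨c :: u, s, by simp [hus], hkws, v, hv, by simpa using hsuf⟩
    · rintro ⟨u, s, hus, hkws, v, hv, hsuf⟩
      cases u with
      | nil =>
        simp only [List.nil_append] at hus
        subst hus
        exact Or.inl ⟨hkws, v, hv, by simpa using hsuf⟩
      | cons d u' =>
        simp only [List.cons_append, List.cons.injEq] at hus
        obtain ⟨rfl, rfl⟩ := hus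
        exact Or.inr ⟨u', s, rfl, hkws, v, hv, by simpa using hsuf⟩

-- kwScan from the start of t = 'some verb+keyword phrase occurs in t'
lemma kwScan_eq_any (kw : List Char) (verbs : List (List Char)) (hkw : kw ≠ []) (t : List Char) :
    kwScan kw verbs [] t = verbs.any (fun v => PySem.Chars.isIn (v ++ kw) t) := by
  rw [Bool.eq_iff_iff, kwScan_iff kw verbs hkw t []]
  simp only [List.any_eq_true, PySem.Chars.isIn_iff_infix, List.nil_append]
  constructor
  · rintro ⟨u, s, rfl, ⟨s', rfl⟩, v, hv, ⟨a, rfl⟩⟩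
    exact ⟨v, hv, ⟨a, s', by simp⟩⟩
  · rintro ⟨v, hv, a, b, rfl⟩
    exact ⟨a ++ v, kw ++ b, by simp, ⟨b, rfl⟩, v, hv, ⟨a, rfl⟩⟩

lemma isIn_of_prefix_isIn {p q : List Char} (hpq : p <+: q) {cs : List Char}
    (h : PySem.Chars.isIn q cs = true) : PySem.Chars.isIn p cs = true := by
  rw [PySem.Chars.isIn_iff_infix] at h ⊢
  exact hpq.isInfix.trans h

-- each plural '... reminders' phrase of A is subsumed by its singular verb+keyword form in B
lemma rem_any_eq (t : String) :
    remPhrasesA.any (fun p => PySem.Str.isIn p t)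
      = remVerbs.any (fun v => PySem.Chars.isIn (v ++ "reminder".toList) t.toList) := by
  rw [Bool.eq_iff_iff]
  simp only [remPhrasesA, remVerbs, List.any_cons, List.any_nil, Bool.or_eq_true,
    Bool.false_eq_true, PySem.Str.isIn_eq, or_false,
    show "go to ".toList ++ "reminder".toList = "go to reminder".toList from by decide,
    show "show ".toList ++ "reminder".toList = "show reminder".toList from by decide,
    show "open ".toList ++ "reminder".toList = "open reminder".toList from by decide,
    show "view ".toList ++ "reminder".toList = "view reminder".toList from by decide,
    show "take me to ".toList ++ "reminder".toList = "take me to reminder".toList from by decide,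
    show "navigate to ".toList ++ "reminder".toList = "navigate to reminder".toList from by decide]
  constructor
  · rintro (h | h | h | h | h | h | h | h | h | h | h | h)
    · exact Or.inl h
    · exact Or.inl (isIn_of_prefix_isIn (by decide) h)
    · exact Or.inr (Or.inl h)
    · exact Or.inr (Or.inl (isIn_of_prefix_isIn (by decide) h))
    · exact Or.inr (Or.inr (Or.inl h))
    · exact Or.inr (Or.inr (Or.inl (isIn_of_prefix_isIn (by decide) h)))
    · exact Or.inr (Or.inr (Or.inr (Or.inl h)))
    · exact Or.inr (Or.inr (Or.inr (Or.inl (isIn_of_prefix_isIn (by decide) h))))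
    · exact Or.inr (Or.inr (Or.inr (Or.inr (Or.inl h))))
    · exact Or.inr (Or.inr (Or.inr (Or.inr (Or.inl (isIn_of_prefix_isIn (by decide) h)))))
    · exact Or.inr (Or.inr (Or.inr (Or.inr (Or.inr h))))
    · exact Or.inr (Or.inr (Or.inr (Or.inr (Or.inr (isIn_of_prefix_isIn (by decide) h)))))
  · rintro (h | h | h | h | h | h)
    · exact Or.inl h
    · exact Or.inr (Or.inr (Or.inl h))
    · exact Or.inr (Or.inr (Or.inr (Or.inr (Or.inl h))))
    · exact Or.inr (Or.inr (Or.inr (Or.inr (Or.inr (Or.inr (Or.inl h))))))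
    · exact Or.inr (Or.inr (Or.inr (Or.inr (Or.inr (Or.inr (Or.inr (Or.inr (Or.inl h))))))))
    · exact Or.inr (Or.inr (Or.inr (Or.inr (Or.inr (Or.inr (Or.inr (Or.inr (Or.inr (Or.inr (Or.inl h))))))))))

lemma home_any_eq (t : String) :
    homePhrasesA.any (fun p => PySem.Str.isIn p t)
      = homeVerbs.any (fun v => PySem.Chars.isIn (v ++ "home".toList) t.toList) := by
  simp only [homePhrasesA, homeVerbs, List.any_cons, List.any_nil, PySem.Str.isIn_eq,
    show "go to ".toList ++ "home".toList = "go to home".toList from by decide,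
    show "go ".toList ++ "home".toList = "go home".toList from by decide,
    show "show ".toList ++ "home".toList = "show home".toList from by decide,
    show "open ".toList ++ "home".toList = "open home".toList from by decide,
    show "view ".toList ++ "home".toList = "view home".toList from by decide,
    show "take me to ".toList ++ "home".toList = "take me to home".toList from by decide,
    show "navigate to ".toList ++ "home".toList = "navigate to home".toList from by decide,
    show "return to ".toList ++ "home".toList = "return to home".toList from by decide,
    show "back to ".toList ++ "home".toList = "back to home".toList from by decide]

-- ===== VERDICT =====
theorem check_for_navigation_command_py_spec : Claim_equal_check_for_navigation_command_py := by
  intro text _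
  unfold Spec_check_for_navigation_command_py
  simp only [check_for_navigation_command_py, check_for_navigation_command_py_alt,
    kwScan_eq_any "reminder".toList remVerbs (by decide),
    kwScan_eq_any "home".toList homeVerbs (by decide), rem_any_eq, home_any_eq]
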